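-- pv_equiv track=rewrite | github.com/aimarsg/minerIA | clustering.py | conseguir_instancias_fusionadas
-- ===== SOURCE A (Python) =====
-- def conseguir_instancias_fusionadas(cluster, instancias, lista, instancias_fusionadas):
--     """
--     Método recursivo para devolver las instancias de los clusters
--     """
--     if cluster in lista.keys():  # Si es un índice de instancia
--         a = lista[cluster]
--         for v in a:
--             conseguir_instancias_fusionadas(v, instancias, lista, instancias_fusionadas)
--     else:
--         instancias_fusionadas.append(instancias[cluster][0])
--     return instancias_fusionadas
-- ===== SOURCE B (Python) =====
-- def conseguir_instancias_fusionadas(cluster, instancias, lista, instancias_fusionadas):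
--     """
--     Iterative pre-order DFS with an explicit stack (same return value and
--     same in-place mutation of instancias_fusionadas as the recursive original).
--     """
--     stack = [cluster]
--     while stack:
--         node = stack.pop()
--         if node in lista.keys():
--             stack.extend(reversed(lista[node]))
--         else:
--             instancias_fusionadas.append(instancias[node][0])
--     return instancias_fusionadas
-- ===== Notes on version B (the rewrite author's own statement) =====
-- stated objective: alternative
-- what changed: Replaces A's recursion through the cluster tree by an iterative pre-order DFS over an explicit stack (children pushed in reversed order), with the same return value and the same in-place appends; Pre_ excludes exactly the inputs on which A raises: a cycle reachable from cluster (RecursionError) or a reachable leaf id whose instancias entry is missing or empty (KeyError/IndexError).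
import Mathlib
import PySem

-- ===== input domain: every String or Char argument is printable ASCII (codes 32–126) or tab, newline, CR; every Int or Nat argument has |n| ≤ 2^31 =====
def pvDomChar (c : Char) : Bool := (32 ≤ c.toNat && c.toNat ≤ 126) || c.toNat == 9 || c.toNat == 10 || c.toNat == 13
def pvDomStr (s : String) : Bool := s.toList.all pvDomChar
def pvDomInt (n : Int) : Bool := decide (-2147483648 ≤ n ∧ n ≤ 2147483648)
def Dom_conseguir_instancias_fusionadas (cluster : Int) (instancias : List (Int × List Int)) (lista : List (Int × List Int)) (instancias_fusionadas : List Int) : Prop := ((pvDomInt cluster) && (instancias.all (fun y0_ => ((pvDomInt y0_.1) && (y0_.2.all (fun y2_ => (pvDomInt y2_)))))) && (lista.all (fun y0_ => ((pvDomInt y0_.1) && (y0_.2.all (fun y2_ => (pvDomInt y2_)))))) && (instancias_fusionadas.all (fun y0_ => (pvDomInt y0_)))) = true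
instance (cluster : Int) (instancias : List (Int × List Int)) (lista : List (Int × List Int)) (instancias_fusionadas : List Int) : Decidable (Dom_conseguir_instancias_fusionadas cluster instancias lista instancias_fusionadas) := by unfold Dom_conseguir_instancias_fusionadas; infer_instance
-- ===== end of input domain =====

-- B replaces A's recursion by an iterative pre-order DFS over an explicit stack; same return
-- value and the same in-place append mutations of instancias_fusionadas (equivalence proved
-- about the return value).

-- ===== PORT A =====
-- Python A recurses through `lista`; on any input satisfying Pre_ the recursion depth is at
-- most (number of keys of lista) + 1, so the port carries that as fuel (a totalization guard
-- only; the proof shows it is never exhausted on Pre_).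
def pvGoA (instancias lista : List (Int × List Int)) : Nat → Int → List Int → List Int
  | 0, _, acc => acc          -- dead under Pre_
  | f + 1, c, acc =>
    match (PySem.Dict.mk lista).get? c with
    | some a => a.foldl (fun acc v => pvGoA instancias lista f v acc) acc
    | none =>
      match (PySem.Dict.mk instancias).get? c with
      | some (x :: _) => acc ++ [x]      -- instancias_fusionadas.append(instancias[cluster][0])
      | _ => acc                         -- KeyError / IndexError in Python: outside Pre_

def conseguir_instancias_fusionadas (cluster : Int) (instancias : List (Int × List Int)) (lista : List (Int × List Int)) (instancias_fusionadas : List Int) : List Int :=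
  pvGoA instancias lista (lista.length + 1) cluster instancias_fusionadas

-- ===== PORT B =====
-- Fuel for B's while-loop: the number of pops it performs on a Pre_ input, i.e. the number of
-- nodes of the unfolded tree below `cluster` (a totalization guard only, never exhausted on Pre_).
def pvCnt (lista : List (Int × List Int)) : Nat → Int → Nat
  | 0, _ => 1
  | f + 1, c =>
    match (PySem.Dict.mk lista).get? c with
    | some a => 1 + (a.map (pvCnt lista f)).sum
    | none => 1

-- Stack modelled head-as-top: Python's `stack.pop()` + `extend(reversed(children))` is popping
-- the head and prepending the children in order.
def pvGoB (instancias lista : List (Int × List Int)) : Nat → List Int → List Int → List Int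
  | 0, _, acc => acc          -- fuel exhausted: dead under Pre_
  | _ + 1, [], acc => acc     -- while stack: loop ends
  | f + 1, node :: rest, acc =>
    match (PySem.Dict.mk lista).get? node with
    | some a => pvGoB instancias lista f (a ++ rest) acc
    | none =>
      match (PySem.Dict.mk instancias).get? node with
      | some (x :: _) => pvGoB instancias lista f rest (acc ++ [x])
      | _ => pvGoB instancias lista f rest acc   -- KeyError / IndexError in Python: outside Pre_

def conseguir_instancias_fusionadas_alt (cluster : Int) (instancias : List (Int × List Int)) (lista : List (Int × List Int)) (instancias_fusionadas : List Int) : List Int :=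
  pvGoB instancias lista (pvCnt lista (lista.length + 1) cluster) [cluster] instancias_fusionadas

-- ===== PRECONDITION & SPEC =====
-- `lista` viewed as a graph (key → its children); bounded closure = reachability.
def pvChildren (lista : List (Int × List Int)) (k : Int) : List Int :=
  ((PySem.Dict.mk lista).get? k).getD []

def pvIsKey (lista : List (Int × List Int)) (k : Int) : Bool :=
  ((PySem.Dict.mk lista).get? k).isSome

def pvStep (lista : List (Int × List Int)) (S : Finset Int) : Finset Int :=
  S ∪ S.biUnion (fun k => (pvChildren lista k).toFinset)

def pvReachN (lista : List (Int × List Int)) : Nat → Finset Int → Finset Int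
  | 0, S => S
  | n + 1, S => pvReachN lista n (pvStep lista S)

def pvN (lista : List (Int × List Int)) : Nat := (lista.map (fun p => p.2.length)).sum + 1

def pvReach (lista : List (Int × List Int)) (S : Finset Int) : Finset Int :=
  pvReachN lista (pvN lista) S

def pvDesc (lista : List (Int × List Int)) (v : Int) : Finset Int :=
  pvReach lista (pvChildren lista v).toFinset

-- Pre_ excludes exactly the inputs on which Python A raises: a cycle in `lista` reachable from
-- cluster (unbounded recursion → RecursionError) or a reachable leaf id whose `instancias`
-- entry is missing or empty (KeyError / IndexError).
def Pre_conseguir_instancias_fusionadas (cluster : Int) (instancias : List (Int × List Int)) (lista : List (Int × List Int)) (instancias_fusionadas : List Int) : Prop :=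
  ∀ v ∈ pvReach lista {cluster},
    (pvIsKey lista v = true → v ∉ pvDesc lista v) ∧
    (pvIsKey lista v = false → ((PySem.Dict.mk instancias).get? v).getD [] ≠ [])
instance (cluster : Int) (instancias : List (Int × List Int)) (lista : List (Int × List Int)) (instancias_fusionadas : List Int) : Decidable (Pre_conseguir_instancias_fusionadas cluster instancias lista instancias_fusionadas) := by unfold Pre_conseguir_instancias_fusionadas; infer_instance

def pvWitness_conseguir_instancias_fusionadas : Int × (List (Int × List Int)) × (List (Int × List Int)) × List Int :=
  (0, [(1, [10]), (2, [20])], [(0, [1, 2])], [])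

def Spec_conseguir_instancias_fusionadas (cluster : Int) (instancias : List (Int × List Int)) (lista : List (Int × List Int)) (instancias_fusionadas : List Int) (out : List Int) : Prop := out = conseguir_instancias_fusionadas_alt cluster instancias lista instancias_fusionadas
instance (cluster : Int) (instancias : List (Int × List Int)) (lista : List (Int × List Int)) (instancias_fusionadas : List Int) (out : List Int) : Decidable (Spec_conseguir_instancias_fusionadas cluster instancias lista instancias_fusionadas out) := by unfold Spec_conseguir_instancias_fusionadas; infer_instance

-- ===== CLAIM (what is proved, stated in full; the proofs are below) =====
def Claim_equal_conseguir_instancias_fusionadas : Prop := ∀ (cluster : Int) (instancias : List (Int × List Int)) (lista : List (Int × List Int)) (instancias_fusionadas : List Int), Dom_conseguir_instancias_fusionadas cluster instancias lista instancias_fusionadas → Pre_conseguir_instancias_fusionadas cluster instancias lista instancias_fusionadas → Spec_conseguir_instancias_fusionadas cluster instancias lista instancias_fusionadas (conseguir_instancias_fusionadas cluster instancias lista instancias_fusionadas)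

-- ===== LEMMAS AND PROOFS =====

lemma pvGet_mem (l : List (Int × List Int)) (c : Int) (a : List Int)
    (h : (PySem.Dict.mk l).get? c = some a) : (c, a) ∈ l := by
  induction l with
  | nil => simp [PySem.Dict.get?] at h
  | cons p t ih =>
    obtain ⟨k, v⟩ := p
    rw [PySem.Dict.get?_mk_cons] at h
    by_cases hk : k = c
    · subst hk; simp at h; simp [h]
    · simp [hk] at h
      exact List.mem_cons_of_mem _ (ih h)

lemma pvSubset_pvStep (lista : List (Int × List Int)) (S : Finset Int) : S ⊆ pvStep lista S :=
  Finset.subset_union_left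

lemma pvStep_mono (lista : List (Int × List Int)) {S T : Finset Int} (h : S ⊆ T) :
    pvStep lista S ⊆ pvStep lista T :=
  Finset.union_subset_union h (Finset.biUnion_subset_biUnion_of_subset_left _ h)

lemma pvReachN_step_comm (lista : List (Int × List Int)) (n : Nat) (S : Finset Int) :
    pvReachN lista n (pvStep lista S) = pvStep lista (pvReachN lista n S) := by
  induction n generalizing S with
  | zero => rfl
  | succ n ih =>
    show pvReachN lista n (pvStep lista (pvStep lista S)) = pvStep lista (pvReachN lista n (pvStep lista S))
    rw [ih]

lemma pvSubset_pvReachN (lista : List (Int × List Int)) (n : Nat) (S : Finset Int) :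
    S ⊆ pvReachN lista n S := by
  induction n generalizing S with
  | zero => exact Finset.Subset.refl S
  | succ n ih =>
    exact Finset.Subset.trans (pvSubset_pvStep lista S) (ih (pvStep lista S))

lemma pvReachN_subset_of_closed (lista : List (Int × List Int)) (n : Nat) {S U : Finset Int}
    (hS : S ⊆ U) (hU : pvStep lista U ⊆ U) : pvReachN lista n S ⊆ U := by
  induction n generalizing S with
  | zero => exact hS
  | succ n ih =>
    exact ih (Finset.Subset.trans (pvStep_mono lista hS) hU)

lemma pvReachN_of_closed (lista : List (Int × List Int)) (n : Nat) {S : Finset Int}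
    (h : pvStep lista S ⊆ S) : pvReachN lista n S = S := by
  induction n with
  | zero => rfl
  | succ n ih =>
    show pvReachN lista n (pvStep lista S) = S
    rw [Finset.Subset.antisymm h (pvSubset_pvStep lista S), ih]

lemma pvReachN_add (lista : List (Int × List Int)) (a b : Nat) (S : Finset Int) :
    pvReachN lista (a + b) S = pvReachN lista b (pvReachN lista a S) := by
  induction a generalizing S with
  | zero => rw [Nat.zero_add]; rfl
  | succ a ih =>
    rw [show a + 1 + b = (a + b) + 1 from by omega]
    show pvReachN lista (a + b) (pvStep lista S) = _
    rw [ih]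
    rfl

-- the fixed universe every closure stays inside
def pvBig (lista : List (Int × List Int)) : Finset Int :=
  lista.foldr (fun p acc => p.2.toFinset ∪ acc) ∅

lemma pvMem_subset_pvBig (l : List (Int × List Int)) (k : Int) (a : List Int)
    (h : (k, a) ∈ l) : a.toFinset ⊆ pvBig l := by
  induction l with
  | nil => simp at h
  | cons p t ih =>
    rcases List.mem_cons.mp h with h | h
    · subst h
      exact Finset.subset_union_left
    · exact Finset.Subset.trans (ih h) Finset.subset_union_right

lemma pvChildren_subset_pvBig (lista : List (Int × List Int)) (k : Int) :
    (pvChildren lista k).toFinset ⊆ pvBig lista := by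
  unfold pvChildren
  match h : (PySem.Dict.mk lista).get? k with
  | none => simp
  | some a =>
    simp only [Option.getD_some]
    exact pvMem_subset_pvBig lista k a (pvGet_mem lista k a h)

lemma pvBig_card_le (lista : List (Int × List Int)) :
    (pvBig lista).card ≤ (lista.map (fun p => p.2.length)).sum := by
  induction lista with
  | nil => simp [pvBig]
  | cons p t ih =>
    calc (pvBig (p :: t)).card ≤ p.2.toFinset.card + (pvBig t).card := Finset.card_union_le _ _
    _ ≤ p.2.length + (t.map (fun p => p.2.length)).sum :=
        Nat.add_le_add p.2.toFinset_card_le ih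
    _ = ((p :: t).map (fun p => p.2.length)).sum := by simp

lemma pvReachN_subset_univ (lista : List (Int × List Int)) (n : Nat) (S : Finset Int) :
    pvReachN lista n S ⊆ S ∪ pvBig lista := by
  apply pvReachN_subset_of_closed lista n Finset.subset_union_left
  unfold pvStep
  apply Finset.union_subset (Finset.Subset.refl _)
  intro x hx
  obtain ⟨k, _, hk⟩ := Finset.mem_biUnion.mp hx
  exact Finset.mem_union_right _ (pvChildren_subset_pvBig lista k hk)

lemma pvGrowth (lista : List (Int × List Int)) (S : Finset Int) (n : Nat)
    (h : ∀ i < n, ¬ pvStep lista (pvReachN lista i S) ⊆ pvReachN lista i S) :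
    S.card + n ≤ (pvReachN lista n S).card := by
  induction n with
  | zero => rw [Nat.add_zero]; exact Nat.le_refl _
  | succ n ih =>
    have h1 : pvReachN lista (n + 1) S = pvStep lista (pvReachN lista n S) := by
      show pvReachN lista n (pvStep lista S) = _
      exact pvReachN_step_comm lista n S
    have hss : pvReachN lista n S ⊂ pvStep lista (pvReachN lista n S) :=
      Finset.ssubset_iff_subset_ne.mpr ⟨pvSubset_pvStep _ _,
        fun he => h n (Nat.lt_succ_self n) (he ▸ Finset.Subset.refl _)⟩
    have := Finset.card_lt_card hss
    have := ih (fun i hi => h i (Nat.lt_succ_of_lt hi))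
    rw [h1]
    omega

lemma pvReach_closed (lista : List (Int × List Int)) (S : Finset Int) :
    pvStep lista (pvReach lista S) ⊆ pvReach lista S := by
  by_cases h : ∃ i < pvN lista, pvStep lista (pvReachN lista i S) ⊆ pvReachN lista i S
  · obtain ⟨i, hi, hcl⟩ := h
    have : pvReach lista S = pvReachN lista i S := by
      unfold pvReach
      have : pvN lista = i + (pvN lista - i) := by omega
      rw [this, pvReachN_add, pvReachN_of_closed lista _ hcl]
    rw [this]
    exact hcl
  · push Not at h
    exfalso
    have hg := pvGrowth lista S (pvN lista) (fun i hi => by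
      intro hc; exact absurd hc (by
        have := h i hi
        exact this))
    have hu : (pvReachN lista (pvN lista) S).card ≤ (S ∪ pvBig lista).card :=
      Finset.card_le_card (pvReachN_subset_univ lista _ S)
    have h2 : (S ∪ pvBig lista).card ≤ S.card + (pvBig lista).card := Finset.card_union_le _ _
    have h3 := pvBig_card_le lista
    have hn : pvN lista = (lista.map (fun p => p.2.length)).sum + 1 := rfl
    omega

-- children of a reachable key are reachable
lemma pvStep_mem (lista : List (Int × List Int)) {R : Finset Int} {k v : Int} {a : List Int}
    (hk : k ∈ R) (ha : (PySem.Dict.mk lista).get? k = some a) (hv : v ∈ a) :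
    v ∈ pvStep lista R := by
  apply Finset.mem_union_right
  apply Finset.mem_biUnion.mpr
  exact ⟨k, hk, by simp [pvChildren, ha, hv]⟩

lemma pvDesc_child_subset (lista : List (Int × List Int)) {k v : Int} {a : List Int}
    (ha : (PySem.Dict.mk lista).get? k = some a) (hv : v ∈ a) :
    pvDesc lista v ⊆ pvDesc lista k := by
  have hvk : v ∈ pvDesc lista k :=
    pvSubset_pvReachN lista _ _ (by simp [pvChildren, ha, hv])
  apply pvReachN_subset_of_closed lista _ ?_ (pvReach_closed lista _)
  intro x hx
  exact pvReach_closed lista _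
    (Finset.mem_union_right _ (Finset.mem_biUnion.mpr ⟨v, hvk, hx⟩))

def pvRank (lista : List (Int × List Int)) (v : Int) : Nat :=
  ((insert v (pvDesc lista v)).filter (fun k => pvIsKey lista k = true)).card

lemma pvRank_lt (lista : List (Int × List Int)) {k v : Int} {a : List Int}
    (ha : (PySem.Dict.mk lista).get? k = some a) (hv : v ∈ a)
    (hcyc : k ∉ pvDesc lista k) : pvRank lista v < pvRank lista k := by
  have hvk : v ∈ pvDesc lista k :=
    pvSubset_pvReachN lista _ _ (by simp [pvChildren, ha, hv])
  apply Finset.card_lt_card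
  constructor
  · apply Finset.filter_subset_filter
    intro x hx
    rcases Finset.mem_insert.mp hx with rfl | hx
    · exact Finset.mem_insert_of_mem hvk
    · exact Finset.mem_insert_of_mem (pvDesc_child_subset lista ha hv hx)
  · intro hsup
    have hk : k ∈ (insert k (pvDesc lista k)).filter (fun x => pvIsKey lista x = true) :=
      Finset.mem_filter.mpr ⟨Finset.mem_insert_self _ _, by simp [pvIsKey, ha]⟩
    have := Finset.mem_filter.mp (hsup hk)
    rcases Finset.mem_insert.mp this.1 with rfl | hkd
    · exact hcyc hvk
    · exact hcyc (pvDesc_child_subset lista ha hv hkd)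

lemma pvRank_le (lista : List (Int × List Int)) (v : Int) :
    pvRank lista v ≤ lista.length := by
  unfold pvRank
  calc _ ≤ ((lista.map Prod.fst).toFinset).card := by
        apply Finset.card_le_card
        intro x hx
        have hk := (Finset.mem_filter.mp hx).2
        simp only [pvIsKey, Option.isSome_iff_exists] at hk
        obtain ⟨b, hb⟩ := hk
        exact List.mem_toFinset.mpr (List.mem_map.mpr ⟨(x, b), pvGet_mem lista x b hb, rfl⟩)
  _ ≤ (lista.map Prod.fst).length := List.toFinset_card_le _
  _ = lista.length := by simp

-- Main correspondence: popping one node off B's stack consumes exactly pvCnt fuel and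
-- computes exactly A's recursive call on that node.
lemma pvMain (instancias lista : List (Int × List Int)) (R : Finset Int)
    (hclosed : pvStep lista R ⊆ R)
    (hcyc : ∀ v ∈ R, pvIsKey lista v = true → v ∉ pvDesc lista v)
    (hleaf : ∀ v ∈ R, pvIsKey lista v = false → ((PySem.Dict.mk instancias).get? v).getD [] ≠ []) :
    ∀ f c rest acc fuel, c ∈ R → pvRank lista c < f →
      pvGoB instancias lista (pvCnt lista f c + fuel) (c :: rest) acc
        = pvGoB instancias lista fuel rest (pvGoA instancias lista f c acc) := by
  intro f
  induction f with
  | zero => intro c rest acc fuel _ h0; omega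
  | succ f ih =>
    intro c rest acc fuel hcR hfuel
    match hc : (PySem.Dict.mk lista).get? c with
    | none =>
      have hne := hleaf c hcR (by simp [pvIsKey, hc])
      have hcnt : pvCnt lista (f + 1) c = 1 := by rw [pvCnt, hc]
      match hi : (PySem.Dict.mk instancias).get? c with
      | none => rw [hi] at hne; simp at hne
      | some [] => rw [hi] at hne; simp at hne
      | some (x :: t) =>
        rw [hcnt, Nat.add_comm 1 fuel, pvGoB, hc, hi, pvGoA, hc, hi]
    | some a =>
      have hcnt : pvCnt lista (f + 1) c = 1 + (a.map (pvCnt lista f)).sum := by rw [pvCnt, hc]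
      have hstep : ∀ s, pvGoB instancias lista (1 + s) (c :: rest) acc
          = pvGoB instancias lista s (a ++ rest) acc := by
        intro s
        rw [Nat.add_comm 1 s, pvGoB, hc]
      rw [hcnt, Nat.add_assoc, hstep, pvGoA, hc]
      have hsub : ∀ v ∈ a, v ∈ R ∧ pvRank lista v < f := by
        intro v hv
        have hvR : v ∈ R := hclosed (pvStep_mem lista hcR hc hv)
        have := pvRank_lt lista hc hv (hcyc c hcR (by simp [pvIsKey, hc]))
        exact ⟨hvR, by omega⟩
      clear hcnt hstep hc hcR hfuel
      induction a generalizing acc with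
      | nil => simp
      | cons v a' iha =>
        have hv := hsub v (List.mem_cons_self)
        simp only [List.map_cons, List.sum_cons, List.cons_append, List.foldl_cons]
        rw [Nat.add_assoc]
        rw [ih v (a' ++ rest) acc _ hv.1 hv.2]
        exact iha (pvGoA instancias lista f v acc)
          (fun w hw => hsub w (List.mem_cons_of_mem _ hw))

-- ===== VERDICT (by name: the statement is the Claim_ definition above) =====
theorem conseguir_instancias_fusionadas_spec : Claim_equal_conseguir_instancias_fusionadas := by
  intro cluster instancias lista acc _ hpre
  unfold Spec_conseguir_instancias_fusionadas
  unfold conseguir_instancias_fusionadas conseguir_instancias_fusionadas_alt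
  have hcl : cluster ∈ pvReach lista {cluster} :=
    pvSubset_pvReachN lista _ _ (Finset.mem_singleton_self cluster)
  have hmain := pvMain instancias lista (pvReach lista {cluster})
    (pvReach_closed lista _)
    (fun v hv hk => (hpre v hv).1 hk)
    (fun v hv hk => (hpre v hv).2 hk)
    (lista.length + 1) cluster [] acc 0 hcl
    (by have := pvRank_le lista cluster; omega)
  rw [Nat.add_zero] at hmain
  rw [hmain, pvGoB]
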